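-- pv_equiv track=rewrite | github.com/demanghon/contree.ai | apps/coinche-model-comparator/src/agent.py | get_card
-- ===== SOURCE A (Python) =====
-- def get_card(hand_int, history_int, board_cards, trump_val, legal_mask):
--     # Deterministic Rules
--     # 1. If partner controls trick and I don't need to cut -> Play small score (dump trash) or points (if safe)?
--     # 2. If valid to cut, do I?
--     # Simple Heuristic: Play Highest Legal Card (Power)
--
--     legal_cards = []
--     for i in range(32):
--         if (legal_mask & (1 << i)) != 0:
--             legal_cards.append(i)
--
--     # Rank is (card % 8).
--     # Standard Order: 7(0) < 8(1) < 9(2) < 10(3) < J(4) < Q(5) < K(6) < A(7)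
--     # Trump Order: 7 < 8 < Q < K < 10 < A < 9 < J
--
--     best_card = legal_cards[0]
--     max_power = -1
--
--     for c in legal_cards:
--         suit = c // 8
--         rank = c % 8
--         is_trump_card = (suit == trump_val) or (trump_val == 5) # AllTrump=5
--
--         # Simplified Power
--         if is_trump_card:
--             # J=7, 9=6, A=5, 10=4, K=3, Q=2, 8=1, 7=0
--             power_map = {4:7, 2:6, 7:5, 3:4, 6:3, 5:2, 1:1, 0:0}
--             power = 100 + power_map.get(rank, 0)
--         else:
--             # A=7, 10=6, K=5, Q=4, J=3, 9=2, 8=1, 7=0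
--             power_map = {7:7, 3:6, 6:5, 5:4, 4:3, 2:2, 1:1, 0:0}
--             power = power_map.get(rank, 0)
--
--         if power > max_power:
--             max_power = power
--             best_card = c
--
--     return best_card
-- ===== SOURCE B (Python) =====
-- def get_card(hand_int, history_int, board_cards, trump_val, legal_mask):
--     # Preference-order traversal: walk the fixed power orderings (trump ranks
--     # strongest-first, then plain ranks strongest-first) and return the first
--     # legal card that matches; ties inside a rank go to the lowest card index.
--     legal = [i for i in range(32) if legal_mask & (1 << i)]
--
--     def is_trump(c):
--         return c // 8 == trump_val or trump_val == 5  # AllTrump=5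
--
--     TRUMP_ORDER = [4, 2, 7, 3, 6, 5, 1, 0]   # J, 9, A, 10, K, Q, 8, 7
--     PLAIN_ORDER = [7, 3, 6, 5, 4, 2, 1, 0]   # A, 10, K, Q, J, 9, 8, 7
--     for r in TRUMP_ORDER:
--         for c in legal:
--             if is_trump(c) and c % 8 == r:
--                 return c
--     for r in PLAIN_ORDER:
--         for c in legal:
--             if not is_trump(c) and c % 8 == r:
--                 return c
--     raise IndexError("no legal card")
-- ===== Notes on version B (the rewrite author's own statement) =====
-- stated objective: alternative
-- what changed: Replaces A's scan-and-track-max over the legal cards with a traversal of the fixed power preference orderings (trump ranks strongest-first, then plain ranks strongest-first) that returns the first legal card matching the current rank slot, so no best/max state is kept.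
import Mathlib
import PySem

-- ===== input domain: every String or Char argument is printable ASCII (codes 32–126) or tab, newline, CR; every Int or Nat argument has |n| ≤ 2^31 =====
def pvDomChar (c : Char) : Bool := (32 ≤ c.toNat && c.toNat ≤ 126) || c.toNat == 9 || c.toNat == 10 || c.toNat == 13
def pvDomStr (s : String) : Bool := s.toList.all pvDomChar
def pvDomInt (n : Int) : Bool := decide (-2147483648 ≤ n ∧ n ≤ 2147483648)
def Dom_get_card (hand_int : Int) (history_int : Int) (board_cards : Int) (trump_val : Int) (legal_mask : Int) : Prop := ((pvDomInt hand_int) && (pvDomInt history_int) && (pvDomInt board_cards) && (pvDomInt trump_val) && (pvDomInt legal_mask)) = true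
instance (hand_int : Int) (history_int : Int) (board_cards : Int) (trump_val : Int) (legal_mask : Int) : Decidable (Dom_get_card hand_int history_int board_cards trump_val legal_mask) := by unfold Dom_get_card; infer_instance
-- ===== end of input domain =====

-- B replaces A's scan-and-track-max over the legal cards by a traversal of the fixed
-- power orderings (trump ranks strongest-first, then plain ranks) returning the first
-- legal match; objective: alternative decomposition, same cost.


-- ===== PORT A =====
-- 'legal_mask & (1 << i)' is PySem.Int.band legal_mask (1 <<< i.toNat); i.toNat is
-- exact because every i of range(0, 32) is nonnegative.
def get_card (hand_int : Int) (history_int : Int) (board_cards : Int) (trump_val : Int) (legal_mask : Int) : Int :=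
  let legal_cards : List Int :=
    (PySem.List.pyRange 0 32 1).foldl
      (fun acc i => if PySem.Int.band legal_mask (1 <<< i.toNat) != 0 then acc ++ [i] else acc) []
  match PySem.List.pyGet? legal_cards 0 with
  | none => 0  -- legal_cards[0] raises IndexError; excluded by Pre_get_card
  | some b0 =>
    (legal_cards.foldl
      (fun (st : Int × Int) c =>
        let suit := PySem.Int.floordiv c 8
        let rank := PySem.Int.mod c 8
        let is_trump_card := (suit == trump_val) || (trump_val == 5)
        let power : Int :=
          if is_trump_card then
            100 + PySem.Dict.getD (PySem.Dict.ofList [(4,7),(2,6),(7,5),(3,4),(6,3),(5,2),(1,1),(0,0)]) rank 0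
          else
            PySem.Dict.getD (PySem.Dict.ofList [(7,7),(3,6),(6,5),(5,4),(4,3),(2,2),(1,1),(0,0)]) rank 0
        if st.2 < power then (c, power) else st)
      (b0, -1)).1

-- ===== PORT B =====
def get_card_alt (hand_int : Int) (history_int : Int) (board_cards : Int) (trump_val : Int) (legal_mask : Int) : Int :=
  let legal : List Int :=
    (PySem.List.pyRange 0 32 1).filter (fun i => PySem.Int.band legal_mask (1 <<< i.toNat) != 0)
  let is_trump : Int → Bool := fun c => (PySem.Int.floordiv c 8 == trump_val) || (trump_val == 5)
  let trumpOrder : List Int := [4, 2, 7, 3, 6, 5, 1, 0]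
  let plainOrder : List Int := [7, 3, 6, 5, 4, 2, 1, 0]
  match trumpOrder.findSome? (fun r => legal.find? (fun c => is_trump c && (PySem.Int.mod c 8 == r))) with
  | some c => c
  | none =>
    match plainOrder.findSome? (fun r => legal.find? (fun c => !is_trump c && (PySem.Int.mod c 8 == r))) with
    | some c => c
    | none => 0  -- 'raise IndexError': unreachable when some legal card exists; excluded by Pre_get_card

-- ===== PRECONDITION & SPEC =====
-- Pre_ excludes exactly the masks with no bit set among 0..31: there A's legal_cards[0]
-- raises IndexError (and B raises IndexError as well).
def Pre_get_card (hand_int : Int) (history_int : Int) (board_cards : Int) (trump_val : Int) (legal_mask : Int) : Prop :=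
  ∃ i : Fin 32, PySem.Int.band legal_mask (1 <<< (i : Nat)) ≠ 0
instance (hand_int : Int) (history_int : Int) (board_cards : Int) (trump_val : Int) (legal_mask : Int) : Decidable (Pre_get_card hand_int history_int board_cards trump_val legal_mask) := by unfold Pre_get_card; infer_instance
def pvWitness_get_card : Int × Int × Int × Int × Int := (0, 0, 0, 0, 1)

def Spec_get_card (hand_int : Int) (history_int : Int) (board_cards : Int) (trump_val : Int) (legal_mask : Int) (out : Int) : Prop := out = get_card_alt hand_int history_int board_cards trump_val legal_mask
instance (hand_int : Int) (history_int : Int) (board_cards : Int) (trump_val : Int) (legal_mask : Int) (out : Int) : Decidable (Spec_get_card hand_int history_int board_cards trump_val legal_mask out) := by unfold Spec_get_card; infer_instance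

-- ===== CLAIM (what is proved, stated in full; the proofs are below) =====
def Claim_equal_get_card : Prop := ∀ (hand_int : Int) (history_int : Int) (board_cards : Int) (trump_val : Int) (legal_mask : Int), Dom_get_card hand_int history_int board_cards trump_val legal_mask → Pre_get_card hand_int history_int board_cards trump_val legal_mask → Spec_get_card hand_int history_int board_cards trump_val legal_mask (get_card hand_int history_int board_cards trump_val legal_mask)

-- ===== LEMMAS AND PROOFS =====

-- A's per-card power, as one function of the trump value and the card.
def pvPow (tv c : Int) : Int :=
  if (PySem.Int.floordiv c 8 == tv) || (tv == 5) then
    100 + PySem.Dict.getD (PySem.Dict.ofList [(4,7),(2,6),(7,5),(3,4),(6,3),(5,2),(1,1),(0,0)]) (PySem.Int.mod c 8) 0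
  else
    PySem.Dict.getD (PySem.Dict.ofList [(7,7),(3,6),(6,5),(5,4),(4,3),(2,2),(1,1),(0,0)]) (PySem.Int.mod c 8) 0

def pvStep (f : Int → Int) (st : Int × Int) (c : Int) : Int × Int :=
  if st.2 < f c then (c, f c) else st

def pvMax (f : Int → Int) (l : List Int) (m : Int) : Int :=
  l.foldl (fun a c => max a (f c)) m

-- the descending list of all power values
def pvVals : List Int := [107, 106, 105, 104, 103, 102, 101, 100, 7, 6, 5, 4, 3, 2, 1, 0]

lemma pvFind?_congr {α : Type} {p q : α → Bool} (l : List α) (h : ∀ x ∈ l, p x = q x) :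
    l.find? p = l.find? q := by
  induction l with
  | nil => rfl
  | cons a t ih =>
    simp only [List.find?, h a (List.mem_cons_self ..)]
    cases q a <;> simp [ih (fun x hx => h x (List.mem_cons_of_mem _ hx))]

lemma pvFindSome?_congr {α β : Type} {p q : α → Option β} (l : List α) (h : ∀ x ∈ l, p x = q x) :
    l.findSome? p = l.findSome? q := by
  induction l with
  | nil => rfl
  | cons a t ih =>
    simp only [List.findSome?, h a (List.mem_cons_self ..)]
    cases q a <;> simp [ih (fun x hx => h x (List.mem_cons_of_mem _ hx))]

lemma pvMax_attained (f : Int → Int) (l : List Int) (m : Int) :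
    pvMax f l m = m ∨ ∃ c ∈ l, f c = pvMax f l m := by
  have h : pvMax f l m = (l.map f).foldl max m := by
    simp [pvMax, List.foldl_map]
  rcases PySem.List.foldl_max_mem (l.map f) m with h1 | h1
  · exact Or.inl (h ▸ h1)
  · rcases List.mem_map.1 (h ▸ h1 :) with ⟨c, hc, hfc⟩
    exact Or.inr ⟨c, hc, by rw [hfc, h]⟩

-- A's fold returns the first element attaining the running maximum (if the maximum
-- improved on the initial m), else the initial best.
lemma pvFold_fst (f : Int → Int) (l : List Int) (b m : Int) :
    (l.foldl (pvStep f) (b, m)).1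
      = (l.find? (fun c => (f c == pvMax f l m) && decide (m < f c))).getD b := by
  induction l generalizing b m with
  | nil => simp [pvMax]
  | cons c t ih =>
    by_cases h : m < f c
    · have hstep : pvStep f (b, m) c = (c, f c) := by simp [pvStep, h]
      have hmax : pvMax f (t.cons c) m = pvMax f t (f c) := by
        simp only [pvMax, List.foldl_cons, max_eq_right (le_of_lt h)]
      by_cases he : f c = pvMax f t (f c)
      · -- head attains the maximum: A keeps it, the find? hits it first
        have hnone : t.find? (fun x => (f x == pvMax f t (f c)) && decide (f c < f x)) = none := by
          refine List.find?_eq_none.2 (fun x hx => ?_)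
          have hxle : f x ≤ pvMax f t (f c) := by
            simpa [pvMax] using (PySem.List.le_foldl_max_int t f (f c)).2 x hx
          simp only [Bool.and_eq_true, beq_iff_eq, decide_eq_true_eq, not_and]
          intro hxe; omega
        have hcond : ((f c == pvMax f t (f c)) && decide (m < f c)) = true := by
          simp only [Bool.and_eq_true, beq_iff_eq, decide_eq_true_eq]
          exact ⟨he, h⟩
        rw [List.foldl_cons, hstep, ih, hnone, Option.getD_none, hmax]
        simp only [List.find?_cons, hcond, Option.getD_some]
      · -- head below the maximum: it is attained in the tail, strictly above both m and f c
        have hle : f c ≤ pvMax f t (f c) := by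
          simpa [pvMax] using (PySem.List.le_foldl_max_int t f (f c)).1
        have hlt : f c < pvMax f t (f c) := lt_of_le_of_ne hle he
        obtain ⟨x0, hx0, hfx0⟩ : ∃ x ∈ t, f x = pvMax f t (f c) := by
          rcases pvMax_attained f t (f c) with h1 | h1
          · omega
          · exact h1
        have hcong : ∀ x ∈ t,
            ((f x == pvMax f t (f c)) && decide (f c < f x))
              = ((f x == pvMax f t (f c)) && decide (m < f x)) := by
          intro x hx
          by_cases hxe : f x = pvMax f t (f c)
          · have h1 : (decide (f c < f x)) = true :=
              decide_eq_true (show f c < f x by rw [hxe]; exact hlt)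
            have h2 : (decide (m < f x)) = true :=
              decide_eq_true (show m < f x by rw [hxe]; omega)
            rw [h1, h2]
          · rw [beq_eq_false_iff_ne.2 hxe, Bool.false_and, Bool.false_and]
        have hsome : (t.find? (fun x => (f x == pvMax f t (f c)) && decide (m < f x))).isSome := by
          refine List.find?_isSome.2 ⟨x0, hx0, ?_⟩
          simp only [Bool.and_eq_true, beq_iff_eq, decide_eq_true_eq]
          exact ⟨hfx0, by omega⟩
        have hhead : ((f c == pvMax f t (f c)) && decide (m < f c)) = false := by
          rw [beq_eq_false_iff_ne.2 he, Bool.false_and]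
        rw [List.foldl_cons, hstep, ih, pvFind?_congr t hcong, hmax]
        simp only [List.find?_cons, hhead]
        cases hf : t.find? (fun x => (f x == pvMax f t (f c)) && decide (m < f x)) with
        | none => rw [hf] at hsome; simp at hsome
        | some y => simp
    · have hstep : pvStep f (b, m) c = (b, m) := by simp [pvStep, h]
      have hmax : pvMax f (t.cons c) m = pvMax f t m := by
        simp only [pvMax, List.foldl_cons, max_eq_left (by omega : f c ≤ m)]
      have hhead : ((f c == pvMax f t m) && decide (m < f c)) = false := by
        rw [decide_eq_false h, Bool.and_false]
      rw [List.foldl_cons, hstep, ih, hmax]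
      simp only [List.find?_cons, hhead]

-- scanning a strictly descending value list that bounds f on l returns the first
-- element of l attaining the maximum value
lemma pvChain (f : Int → Int) (l : List Int) (M : Int) (vs : List Int)
    (hdesc : vs.Pairwise (· > ·)) (hM : M ∈ vs)
    (hub : ∀ c ∈ l, f c ≤ M) (hex : ∃ c ∈ l, f c = M) :
    vs.findSome? (fun v => l.find? (fun c => f c == v)) = l.find? (fun c => f c == M) := by
  induction vs with
  | nil => simp at hM
  | cons v t ih =>
    by_cases hv : v = M
    · subst hv
      obtain ⟨c0, hc0, hfc0⟩ := hex
      have hsome : (l.find? (fun c => f c == v)).isSome :=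
        List.find?_isSome.2 ⟨c0, hc0, by simp [hfc0]⟩
      cases hf : l.find? (fun c => f c == v) with
      | none => rw [hf] at hsome; simp at hsome
      | some y => simp [List.findSome?, hf]
    · have hMt : M ∈ t := (List.mem_cons.1 hM).resolve_left (fun h => hv h.symm)
      have hvM : v > M := (List.pairwise_cons.1 hdesc).1 M hMt
      have hnone : l.find? (fun c => f c == v) = none := by
        refine List.find?_eq_none.2 (fun x hx => ?_)
        have := hub x hx
        simp only [beq_iff_eq]; omega
      simp only [List.findSome?, hnone]
      exact ih (List.pairwise_cons.1 hdesc).2 hMt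

-- every power value lies in pvVals, and is nonnegative
lemma pvPow_mem_vals (tv c : Int) (_hc : 0 ≤ c) : pvPow tv c ∈ pvVals := by
  have h0 : 0 ≤ PySem.Int.mod c 8 := PySem.Int.mod_nonneg c (by norm_num)
  have h8 : PySem.Int.mod c 8 < 8 := PySem.Int.mod_lt c (by norm_num)
  have h64 : PySem.Int.mod c 8 = 0 ∨ PySem.Int.mod c 8 = 1 ∨ PySem.Int.mod c 8 = 2 ∨
      PySem.Int.mod c 8 = 3 ∨ PySem.Int.mod c 8 = 4 ∨ PySem.Int.mod c 8 = 5 ∨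
      PySem.Int.mod c 8 = 6 ∨ PySem.Int.mod c 8 = 7 := by omega
  unfold pvPow pvVals
  cases hT : ((PySem.Int.floordiv c 8 == tv) || (tv == 5))
  · rw [if_neg (by simp)]
    rcases h64 with h|h|h|h|h|h|h|h <;> rw [h] <;> decide
  · rw [if_pos rfl]
    rcases h64 with h|h|h|h|h|h|h|h <;> rw [h] <;> decide

lemma pvPow_nonneg (tv c : Int) (hc : 0 ≤ c) : 0 ≤ pvPow tv c := by
  have hmem := pvPow_mem_vals tv c hc
  have hall : ∀ v ∈ pvVals, (0:Int) ≤ v := by decide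
  exact hall _ hmem

-- slot equivalences: matching a (category, rank) slot is exactly having the slot's power
lemma pvSlot_trump (tv c : Int) (_hc : 0 ≤ c) (r : Int) (hr : r ∈ ([4,2,7,3,6,5,1,0] : List Int)) :
    (((PySem.Int.floordiv c 8 == tv) || (tv == 5)) && (PySem.Int.mod c 8 == r))
      = (pvPow tv c == 100 + PySem.Dict.getD (PySem.Dict.ofList [(4,7),(2,6),(7,5),(3,4),(6,3),(5,2),(1,1),(0,0)]) r 0) := by
  have h0 : 0 ≤ PySem.Int.mod c 8 := PySem.Int.mod_nonneg c (by norm_num)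
  have h8 : PySem.Int.mod c 8 < 8 := PySem.Int.mod_lt c (by norm_num)
  have h64 : PySem.Int.mod c 8 = 0 ∨ PySem.Int.mod c 8 = 1 ∨ PySem.Int.mod c 8 = 2 ∨
      PySem.Int.mod c 8 = 3 ∨ PySem.Int.mod c 8 = 4 ∨ PySem.Int.mod c 8 = 5 ∨
      PySem.Int.mod c 8 = 6 ∨ PySem.Int.mod c 8 = 7 := by omega
  unfold pvPow
  cases hT : ((PySem.Int.floordiv c 8 == tv) || (tv == 5))
  · rw [if_neg (by simp), Bool.false_and]
    rcases h64 with h|h|h|h|h|h|h|h <;> rw [h] <;> fin_cases hr <;> decide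
  · rw [if_pos rfl, Bool.true_and]
    rcases h64 with h|h|h|h|h|h|h|h <;> rw [h] <;> fin_cases hr <;> decide

lemma pvSlot_plain (tv c : Int) (_hc : 0 ≤ c) (r : Int) (hr : r ∈ ([7,3,6,5,4,2,1,0] : List Int)) :
    ((!((PySem.Int.floordiv c 8 == tv) || (tv == 5))) && (PySem.Int.mod c 8 == r))
      = (pvPow tv c == PySem.Dict.getD (PySem.Dict.ofList [(7,7),(3,6),(6,5),(5,4),(4,3),(2,2),(1,1),(0,0)]) r 0) := by
  have h0 : 0 ≤ PySem.Int.mod c 8 := PySem.Int.mod_nonneg c (by norm_num)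
  have h8 : PySem.Int.mod c 8 < 8 := PySem.Int.mod_lt c (by norm_num)
  have h64 : PySem.Int.mod c 8 = 0 ∨ PySem.Int.mod c 8 = 1 ∨ PySem.Int.mod c 8 = 2 ∨
      PySem.Int.mod c 8 = 3 ∨ PySem.Int.mod c 8 = 4 ∨ PySem.Int.mod c 8 = 5 ∨
      PySem.Int.mod c 8 = 6 ∨ PySem.Int.mod c 8 = 7 := by omega
  unfold pvPow
  cases hT : ((PySem.Int.floordiv c 8 == tv) || (tv == 5))
  · rw [if_neg (by simp), Bool.not_false, Bool.true_and]
    rcases h64 with h|h|h|h|h|h|h|h <;> rw [h] <;> fin_cases hr <;> decide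
  · rw [if_pos rfl, Bool.not_true, Bool.false_and]
    rcases h64 with h|h|h|h|h|h|h|h <;> rw [h] <;> fin_cases hr <;> decide

-- A's power fold, restated through pvStep/pvPow
lemma pvFoldA (tv : Int) (l : List Int) (b m : Int) :
    (l.foldl
      (fun (st : Int × Int) c =>
        if st.2 <
            (if ((PySem.Int.floordiv c 8 == tv) || (tv == 5)) = true then
              100 + PySem.Dict.getD (PySem.Dict.ofList [(4,7),(2,6),(7,5),(3,4),(6,3),(5,2),(1,1),(0,0)]) (PySem.Int.mod c 8) 0
            else
              PySem.Dict.getD (PySem.Dict.ofList [(7,7),(3,6),(6,5),(5,4),(4,3),(2,2),(1,1),(0,0)]) (PySem.Int.mod c 8) 0) then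
          (c,
            if ((PySem.Int.floordiv c 8 == tv) || (tv == 5)) = true then
              100 + PySem.Dict.getD (PySem.Dict.ofList [(4,7),(2,6),(7,5),(3,4),(6,3),(5,2),(1,1),(0,0)]) (PySem.Int.mod c 8) 0
            else
              PySem.Dict.getD (PySem.Dict.ofList [(7,7),(3,6),(6,5),(5,4),(4,3),(2,2),(1,1),(0,0)]) (PySem.Int.mod c 8) 0)
        else st) (b, m)).1
    = (l.find? (fun c => (pvPow tv c == pvMax (pvPow tv) l m) && decide (m < pvPow tv c))).getD b := by
  have hlam : (fun (st : Int × Int) c =>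
        if st.2 <
            (if ((PySem.Int.floordiv c 8 == tv) || (tv == 5)) = true then
              100 + PySem.Dict.getD (PySem.Dict.ofList [(4,7),(2,6),(7,5),(3,4),(6,3),(5,2),(1,1),(0,0)]) (PySem.Int.mod c 8) 0
            else
              PySem.Dict.getD (PySem.Dict.ofList [(7,7),(3,6),(6,5),(5,4),(4,3),(2,2),(1,1),(0,0)]) (PySem.Int.mod c 8) 0) then
          (c,
            if ((PySem.Int.floordiv c 8 == tv) || (tv == 5)) = true then
              100 + PySem.Dict.getD (PySem.Dict.ofList [(4,7),(2,6),(7,5),(3,4),(6,3),(5,2),(1,1),(0,0)]) (PySem.Int.mod c 8) 0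
            else
              PySem.Dict.getD (PySem.Dict.ofList [(7,7),(3,6),(6,5),(5,4),(4,3),(2,2),(1,1),(0,0)]) (PySem.Int.mod c 8) 0)
        else st) = pvStep (pvPow tv) := rfl
  rw [hlam, pvFold_fst]

-- ===== VERDICT (by name: the statement is the Claim_ definition above) =====
theorem get_card_spec : Claim_equal_get_card := by
  intro hand_int history_int board_cards trump_val legal_mask _hdom hpre
  unfold Spec_get_card get_card get_card_alt
  have hfold : (PySem.List.pyRange 0 32 1).foldl
      (fun acc i => if (PySem.Int.band legal_mask (1 <<< i.toNat) != 0) = true then acc ++ [i] else acc) []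
      = (PySem.List.pyRange 0 32 1).filter (fun i => PySem.Int.band legal_mask (1 <<< i.toNat) != 0) := by
    simpa using PySem.List.foldl_append_if
      (fun i : Int => PySem.Int.band legal_mask (1 <<< i.toNat) != 0) id (PySem.List.pyRange 0 32 1) []
  rw [hfold]
  -- the legal list is nonempty (Pre_), split off its head
  obtain ⟨i, hi⟩ := hpre
  have hmemi : (i : Int) ∈ (PySem.List.pyRange 0 32 1).filter
      (fun i => PySem.Int.band legal_mask (1 <<< i.toNat) != 0) := by
    refine List.mem_filter.2 ⟨PySem.List.mem_pyRange_one.2 ⟨by positivity, by exact_mod_cast i.isLt⟩, ?_⟩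
    simpa [Int.toNat_natCast] using hi
  obtain ⟨b0, t, hsplit⟩ : ∃ b0 t, (PySem.List.pyRange 0 32 1).filter
      (fun i => PySem.Int.band legal_mask (1 <<< i.toNat) != 0) = b0 :: t := by
    cases h : (PySem.List.pyRange 0 32 1).filter
        (fun i => PySem.Int.band legal_mask (1 <<< i.toNat) != 0) with
    | nil => rw [h] at hmemi; simp at hmemi
    | cons a l => exact ⟨a, l, rfl⟩
  have hmem32 : ∀ c ∈ b0 :: t, 0 ≤ c ∧ c < 32 := by
    intro c hc
    rw [← hsplit] at hc
    have := (List.mem_filter.1 hc).1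
    exact PySem.List.mem_pyRange_one.1 this
  rw [hsplit]
  have hget : PySem.List.pyGet? (b0 :: t) 0 = some b0 := by
    simp [PySem.List.pyGet?, PySem.List.pyIdx?]
  simp only [hget]
  rw [pvFoldA trump_val (b0 :: t) b0 (-1)]
  have hub : ∀ c ∈ b0 :: t, pvPow trump_val c ≤ pvMax (pvPow trump_val) (b0 :: t) (-1) := by
    intro c hc
    simpa [pvMax] using
      (PySem.List.le_foldl_max_int (b0 :: t) (pvPow trump_val) (-1)).2 c hc
  have hnn : ∀ c ∈ b0 :: t, 0 ≤ pvPow trump_val c := fun c hc =>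
    pvPow_nonneg trump_val c (hmem32 c hc).1
  have hex : ∃ c ∈ b0 :: t, pvPow trump_val c = pvMax (pvPow trump_val) (b0 :: t) (-1) := by
    rcases pvMax_attained (pvPow trump_val) (b0 :: t) (-1) with h1 | h1
    · have h2 := hub b0 (List.mem_cons_self ..)
      have h3 := hnn b0 (List.mem_cons_self ..)
      omega
    · exact h1
  -- drop the always-true '-1 < power' conjunct
  have hdrop : ∀ c ∈ b0 :: t,
      ((pvPow trump_val c == pvMax (pvPow trump_val) (b0 :: t) (-1)) &&
        decide (-1 < pvPow trump_val c))
      = (pvPow trump_val c == pvMax (pvPow trump_val) (b0 :: t) (-1)) := by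
    intro c hc
    rw [decide_eq_true (by have := hnn c hc; omega : (-1:Int) < pvPow trump_val c), Bool.and_true]
  rw [pvFind?_congr _ hdrop]
  obtain ⟨y, hy⟩ : ∃ y, (b0 :: t).find?
      (fun c => pvPow trump_val c == pvMax (pvPow trump_val) (b0 :: t) (-1)) = some y := by
    obtain ⟨c0, hc0, hfc0⟩ := hex
    have hsome : (List.find?
        (fun c => pvPow trump_val c == pvMax (pvPow trump_val) (b0 :: t) (-1)) (b0 :: t)).isSome :=
      List.find?_isSome.2 ⟨c0, hc0, beq_iff_eq.2 hfc0⟩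
    exact Option.isSome_iff_exists.1 hsome
  rw [hy]
  -- B side: rewrite both rank scans into power-value scans
  have e1 : ([4,2,7,3,6,5,1,0] : List Int).findSome?
      (fun r => (b0 :: t).find? (fun c =>
        ((PySem.Int.floordiv c 8 == trump_val) || (trump_val == 5)) && (PySem.Int.mod c 8 == r)))
      = ([107,106,105,104,103,102,101,100] : List Int).findSome?
          (fun v => (b0 :: t).find? (fun c => pvPow trump_val c == v)) := by
    rw [pvFindSome?_congr _ (fun r hr => pvFind?_congr _
      (fun c hc => pvSlot_trump trump_val c (hmem32 c hc).1 r hr))]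
    rw [show ([107,106,105,104,103,102,101,100] : List Int)
        = ([4,2,7,3,6,5,1,0] : List Int).map (fun r =>
            100 + PySem.Dict.getD (PySem.Dict.ofList [(4,7),(2,6),(7,5),(3,4),(6,3),(5,2),(1,1),(0,0)]) r 0)
      from by decide]
    rw [List.findSome?_map]
    rfl
  have e2 : ([7,3,6,5,4,2,1,0] : List Int).findSome?
      (fun r => (b0 :: t).find? (fun c =>
        (!((PySem.Int.floordiv c 8 == trump_val) || (trump_val == 5))) && (PySem.Int.mod c 8 == r)))
      = ([7,6,5,4,3,2,1,0] : List Int).findSome?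
          (fun v => (b0 :: t).find? (fun c => pvPow trump_val c == v)) := by
    rw [pvFindSome?_congr _ (fun r hr => pvFind?_congr _
      (fun c hc => pvSlot_plain trump_val c (hmem32 c hc).1 r hr))]
    rw [show ([7,6,5,4,3,2,1,0] : List Int)
        = ([7,3,6,5,4,2,1,0] : List Int).map (fun r =>
            PySem.Dict.getD (PySem.Dict.ofList [(7,7),(3,6),(6,5),(5,4),(4,3),(2,2),(1,1),(0,0)]) r 0)
      from by decide]
    rw [List.findSome?_map]
    rfl
  rw [e1, e2]
  -- the combined descending scan finds the first card of maximal power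
  have hMmem : pvMax (pvPow trump_val) (b0 :: t) (-1) ∈ pvVals := by
    obtain ⟨c0, hc0, hfc0⟩ := hex
    exact hfc0 ▸ pvPow_mem_vals trump_val c0 (hmem32 c0 hc0).1
  have hchain := pvChain (pvPow trump_val) (b0 :: t) (pvMax (pvPow trump_val) (b0 :: t) (-1))
    pvVals (by decide) hMmem hub hex
  have hor : (([107,106,105,104,103,102,101,100] : List Int).findSome?
        (fun v => (b0 :: t).find? (fun c => pvPow trump_val c == v))).or
      (([7,6,5,4,3,2,1,0] : List Int).findSome?
        (fun v => (b0 :: t).find? (fun c => pvPow trump_val c == v))) = some y := by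
    rw [← List.findSome?_append]
    rw [show ([107,106,105,104,103,102,101,100] : List Int) ++ ([7,6,5,4,3,2,1,0] : List Int)
        = pvVals from rfl]
    rw [hchain, hy]
  cases h1 : ([107,106,105,104,103,102,101,100] : List Int).findSome?
      (fun v => (b0 :: t).find? (fun c => pvPow trump_val c == v)) with
  | some c =>
    rw [h1] at hor
    simp only [Option.some_or] at hor
    simp only [Option.some.injEq] at hor
    rw [hor]
    rfl
  | none =>
    rw [h1] at hor
    simp only [Option.none_or] at hor
    rw [hor]
    rfl
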